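-- pv_equiv track=rewrite | github.com/IZKF-Genomics/izkf_pack | templates/nfcore_scrnaseq/run.py | format_shell_command_lines
-- ===== SOURCE A (Python) =====
-- import shlex
--
-- def format_shell_command_lines(command: list[str]) -> list[str]:
--     lines: list[str] = []
--     index = 0
--     leading_parts: list[str] = []
--     while index < len(command) and not command[index].startswith("-"):
--         leading_parts.append(shlex.quote(command[index]))
--         index += 1
--     if leading_parts:
--         lines.append(" ".join(leading_parts))
--     while index < len(command):
--         token = command[index]
--         rendered = shlex.quote(token)
--         if token.startswith("-") and index + 1 < len(command):
--             next_token = command[index + 1]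
--             if not next_token.startswith("-"):
--                 rendered = f"{rendered} {shlex.quote(next_token)}"
--                 index += 1
--         lines.append(rendered)
--         index += 1
--     return lines
-- ===== SOURCE B (Python) =====
-- _SAFE = set("abcdefghijklmnopqrstuvwxyz"
--             "ABCDEFGHIJKLMNOPQRSTUVWXYZ"
--             "0123456789_@%+=:,./-")
--
--
-- def _quote(s: str) -> str:
--     # shlex.quote, inlined: safe tokens pass through, everything else is
--     # single-quoted with ' escaped as '"'"'.
--     if not s:
--         return "''"
--     if all(c in _SAFE for c in s):
--         return s
--     return "'" + s.replace("'", "'\"'\"'") + "'"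
--
--
-- def format_shell_command_lines(command: list[str]) -> list[str]:
--     # Lookbehind, single pass: no pairing. A token opens a new line unless it
--     # is a non-option that either follows an unconsumed option (it is its
--     # value) or still lies inside the leading run of non-options; such a
--     # token is appended to the line built so far.
--     split = next((i for i, t in enumerate(command) if t.startswith("-")), len(command))
--     buckets: list[list[str]] = []
--     prev = None
--     for i, t in enumerate(command):
--         q = _quote(t)
--         if i > 0 and not t.startswith("-") and (prev.startswith("-") or i < split):
--             buckets[-1].append(q)
--         else:
--             buckets.append([q])
--         prev = t
--     return [" ".join(b) for b in buckets]
-- ===== Notes on version B (the rewrite author's own statement) =====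
-- stated objective: alternative
-- what changed: B drops A's lookahead pairing loops entirely: a single enumerate pass decides per token, from the previous token and a precomputed leading-run boundary, whether the quoted token opens a new line (a fresh bucket) or is appended to the last bucket, and the buckets are joined at the end.
import Mathlib
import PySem

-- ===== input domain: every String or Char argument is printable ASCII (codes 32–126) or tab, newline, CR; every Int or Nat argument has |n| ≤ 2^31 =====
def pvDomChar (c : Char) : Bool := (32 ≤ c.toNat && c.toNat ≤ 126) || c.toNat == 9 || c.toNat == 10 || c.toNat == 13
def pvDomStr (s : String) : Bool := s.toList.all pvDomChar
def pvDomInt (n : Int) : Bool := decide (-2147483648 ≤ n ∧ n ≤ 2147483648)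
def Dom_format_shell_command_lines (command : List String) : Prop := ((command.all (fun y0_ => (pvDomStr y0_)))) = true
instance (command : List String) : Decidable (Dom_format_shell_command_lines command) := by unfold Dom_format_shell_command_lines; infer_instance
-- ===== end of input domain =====

-- B replaces A's lookahead pairing loops with a single lookbehind pass that appends each
-- quoted token to the last line or opens a new one (alternative decomposition, same cost).

-- shlex.quote, ported by hand (shared helper of both ports); exact on the ASCII domain:
-- safe characters are re.ASCII \w plus '@%+=:,./-'; otherwise wrap in single quotes,
-- replacing ' by '"'"'; the empty string becomes ''.
def shlexSafeChar (c : Char) : Bool :=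
  ('a' ≤ c && c ≤ 'z') || ('A' ≤ c && c ≤ 'Z') || ('0' ≤ c && c ≤ '9') ||
  c == '_' || c == '@' || c == '%' || c == '+' || c == '=' || c == ':' ||
  c == ',' || c == '.' || c == '/' || c == '-'

def shlexQuote (s : String) : String :=
  if s.toList = [] then "''"
  else if s.toList.all shlexSafeChar then s
  else String.ofList ('\'' :: (s.toList.flatMap
        (fun c => if c = '\'' then ['\'', '"', '\'', '"', '\''] else [c])) ++ ['\''])

-- ===== PORT A =====
-- A's first while loop: collect the quoted leading parts, return them with the rest.
def aLead : List String → (List String × List String)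
  | [] => ([], [])
  | t :: ts =>
    if PySem.Str.startswith t "-" then ([], t :: ts)
    else
      let r := aLead ts
      (shlexQuote t :: r.1, r.2)

-- A's second while loop over the remaining tokens (index advances by 1 or 2).
def aRest : List String → List String
  | [] => []
  | [t] => [shlexQuote t]
  | t :: n :: ts' =>
    if PySem.Str.startswith t "-" then
      if PySem.Str.startswith n "-" then shlexQuote t :: aRest (n :: ts')
      else (shlexQuote t ++ " " ++ shlexQuote n) :: aRest ts'
    else shlexQuote t :: aRest (n :: ts')

def format_shell_command_lines (command : List String) : List String :=
  let lead := aLead command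
  (if lead.1 ≠ [] then [PySem.Str.join " " lead.1] else []) ++ aRest lead.2

-- ===== PORT B =====
-- Python `buckets[-1].append(q)` (the merge case; buckets is nonempty there).
def bSetLast : List (List String) → String → List (List String)
  | [], _ => []
  | [x], q => [x ++ [q]]
  | x :: xs, q => x :: bSetLast xs q

-- The loop's merge test: `i > 0 and not t.startswith("-") and (prev.startswith("-") or i < split)`.
def bMerge (split i : Nat) (prev : Option String) (t : String) : Bool :=
  decide (i > 0) && !PySem.Str.startswith t "-" &&
    ((match prev with | some p => PySem.Str.startswith p "-" | none => false) ||
      decide (i < split))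

-- The `for i, t in enumerate(command)` loop with its state (buckets, prev).
def bGo (split : Nat) : Nat → Option String → List (List String) → List String → List (List String)
  | _, _, buckets, [] => buckets
  | i, prev, buckets, t :: ts =>
    let q := shlexQuote t
    let buckets' := if bMerge split i prev t then bSetLast buckets q else buckets ++ [[q]]
    bGo split (i + 1) (some t) buckets' ts

def format_shell_command_lines_alt (command : List String) : List String :=
  let split := command.findIdx (fun t => PySem.Str.startswith t "-")
  (bGo split 0 none [] command).map (fun b => PySem.Str.join " " b)

-- ===== PRECONDITION & SPEC =====
def Spec_format_shell_command_lines (command : List String) (out : List String) : Prop := out = format_shell_command_lines_alt command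
instance (command : List String) (out : List String) : Decidable (Spec_format_shell_command_lines command out) := by unfold Spec_format_shell_command_lines; infer_instance

-- ===== CLAIM (what is proved, stated in full; the proofs are below) =====
def Claim_equal_format_shell_command_lines : Prop := ∀ (command : List String), Dom_format_shell_command_lines command → Spec_format_shell_command_lines command (format_shell_command_lines command)

-- ===== LEMMAS AND PROOFS =====

-- Proof-side common form: the grouping both programs realise.
def pGroups : List String → List (List String)
  | [] => []
  | [t] => [[t]]
  | t :: n :: ts' =>
    if PySem.Str.startswith t "-" then
      if PySem.Str.startswith n "-" then [t] :: pGroups (n :: ts')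
      else [t, n] :: pGroups ts'
    else [t] :: pGroups (n :: ts')

def pRender (g : List String) : String := PySem.Str.join " " (g.map shlexQuote)

theorem strEqOfToList {a b : String} (h : a.toList = b.toList) : a = b := by
  rw [← String.ofList_toList (s := a), ← String.ofList_toList (s := b), h]

theorem joinOne (a : String) : PySem.Str.join " " [a] = a := by
  apply strEqOfToList
  simp [PySem.Str.join, PySem.Chars.join_singleton]

theorem joinPair (a b : String) : PySem.Str.join " " [a, b] = a ++ " " ++ b := by
  apply strEqOfToList
  simp [PySem.Str.join, PySem.Chars.join_cons_cons, PySem.Chars.join_singleton]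

-- A's loops in terms of takeWhile/dropWhile and pGroups.
theorem aLead_eq (l : List String) :
    aLead l = ((l.takeWhile (fun t => !PySem.Str.startswith t "-")).map shlexQuote,
               l.dropWhile (fun t => !PySem.Str.startswith t "-")) := by
  induction l with
  | nil => rfl
  | cons t ts ih =>
    simp only [aLead, List.takeWhile, List.dropWhile]
    cases h : PySem.Str.startswith t "-" <;> simp [ih]

theorem aRest_eq (l : List String) : aRest l = (pGroups l).map pRender := by
  fun_induction aRest l <;>
    simp_all [pGroups, pRender, joinOne, joinPair]

theorem findIdx_eq_length_takeWhile (l : List String) (p : String → Bool) :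
    l.findIdx p = (l.takeWhile (fun t => !p t)).length := by
  induction l with
  | nil => rfl
  | cons t ts ih =>
    simp only [List.findIdx_cons, List.takeWhile]
    cases h : p t <;> simp [ih]

theorem bSetLast_append (L : List (List String)) (x : List String) (q : String) :
    bSetLast (L ++ [x]) q = L ++ [x ++ [q]] := by
  induction L with
  | nil => rfl
  | cons a L ih =>
    cases L with
    | nil => rfl
    | cons b L' => simpa [bSetLast] using ih

-- The merge test of B's loop is false whenever i has passed split and the
-- previous token, if it is an option, is followed by an option.
theorem bCond_false (split i : Nat) (t : String) (p : Option String)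
    (hi : ¬ i < split)
    (h : ∀ s, p = some s → PySem.Str.startswith s "-" = true →
        PySem.Str.startswith t "-" = true) :
    bMerge split i p t = false := by
  cases p with
  | none =>
    show (decide (i > 0) && !PySem.Str.startswith t "-" &&
      (false || decide (i < split))) = false
    rw [decide_eq_false hi, Bool.or_false, Bool.and_false]
  | some s =>
    show (decide (i > 0) && !PySem.Str.startswith t "-" &&
      (PySem.Str.startswith s "-" || decide (i < split))) = false
    cases hs : PySem.Str.startswith s "-" with
    | false => rw [decide_eq_false hi, Bool.or_false, Bool.and_false]
    | true =>
      rw [h s rfl hs, Bool.not_true, Bool.and_false, Bool.false_and]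

-- B's loop over the tail segment: no merges happen there, every pGroups group
-- becomes one appended line.
theorem bGo_rest (split : Nat) : ∀ (r : List String) (i : Nat) (p : Option String) (L : List (List String)),
    split ≤ i →
    (∀ s, p = some s → PySem.Str.startswith s "-" = true →
      ∀ t, r.head? = some t → PySem.Str.startswith t "-" = true) →
    bGo split i p L r = L ++ (pGroups r).map (List.map shlexQuote) := by
  intro r
  induction r using pGroups.induct with
  | case1 => intro i p L _ _; simp [bGo, pGroups]
  | case2 t =>
    intro i p L hi hp
    have hc := bCond_false split i t p (Nat.not_lt.mpr hi)
      (fun s hs hst => hp s hs hst t rfl)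
    rw [bGo, hc, if_neg Bool.false_ne_true, bGo]
    simp only [pGroups, List.map_cons, List.map_nil]
  | case3 t n ts' ht hn ih =>
    intro i p L hi hp
    have hc := bCond_false split i t p (Nat.not_lt.mpr hi) (fun _ _ _ => ht)
    rw [bGo, hc, if_neg Bool.false_ne_true]
    rw [ih (i + 1) (some t) _ (by omega)
      (fun s hs hst t' ht' => by cases hs; cases ht'; exact hn)]
    simp only [pGroups]
    rw [ht, hn, if_pos rfl, if_pos rfl]
    simp only [List.map_cons, List.map_nil, List.append_assoc, List.cons_append,
      List.nil_append]
  | case4 t n ts' ht hn ih =>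
    intro i p L hi hp
    rw [Bool.not_eq_true] at hn
    have hc := bCond_false split i t p (Nat.not_lt.mpr hi) (fun _ _ _ => ht)
    have hc2 : bMerge split (i + 1) (some t) n = true := by
      show (decide (i + 1 > 0) && !PySem.Str.startswith n "-" &&
        (PySem.Str.startswith t "-" || decide (i + 1 < split))) = true
      rw [hn, ht, Bool.not_false, Bool.and_true, Bool.true_or, Bool.and_true,
        decide_eq_true_eq]
      omega
    rw [bGo, hc, if_neg Bool.false_ne_true]
    rw [bGo, hc2, if_pos rfl, bSetLast_append]
    rw [ih (i + 1 + 1) (some n) _ (by omega)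
      (fun s hs hst => by cases hs; rw [hn] at hst; cases hst)]
    simp only [pGroups]
    rw [ht, hn, if_pos rfl, if_neg Bool.false_ne_true]
    simp only [List.map_cons, List.map_nil, List.append_assoc, List.cons_append,
      List.nil_append]
  | case5 t n ts' ht ih =>
    intro i p L hi hp
    rw [Bool.not_eq_true] at ht
    have hc := bCond_false split i t p (Nat.not_lt.mpr hi)
      (fun s hs hst => hp s hs hst t rfl)
    rw [bGo, hc, if_neg Bool.false_ne_true]
    rw [ih (i + 1) (some t) _ (by omega)
      (fun s hs hst => by cases hs; rw [ht] at hst; cases hst)]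
    simp only [pGroups]
    rw [ht, if_neg Bool.false_ne_true]
    simp only [List.map_cons, List.map_nil, List.append_assoc, List.cons_append,
      List.nil_append]

-- B's loop over the leading run: everything merges into the single open line.
theorem bGo_lead (split : Nat) : ∀ (l : List String) (i : Nat) (p : String) (acc : List String) (r : List String),
    (∀ t ∈ l, PySem.Str.startswith t "-" = false) →
    1 ≤ i → i + l.length ≤ split →
    bGo split i (some p) [acc] (l ++ r)
      = bGo split (i + l.length) (some (l.getLastD p)) [acc ++ l.map shlexQuote] r := by
  intro l
  induction l with
  | nil => intro i p acc r _ _ _; simp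
  | cons t ts ih =>
    intro i p acc r hall hi hle
    have ht : PySem.Str.startswith t "-" = false := hall t (by simp)
    have hlt : i < split := by simp at hle; omega
    have hc : bMerge split i (some p) t = true := by
      show (decide (i > 0) && !PySem.Str.startswith t "-" &&
        (PySem.Str.startswith p "-" || decide (i < split))) = true
      rw [ht, Bool.not_false, Bool.and_true, decide_eq_true hlt, Bool.or_true,
        Bool.and_true, decide_eq_true_eq]
      omega
    rw [List.cons_append, bGo, hc, if_pos rfl]
    have hsl : bSetLast [acc] (shlexQuote t) = [acc ++ [shlexQuote t]] := rfl
    rw [hsl, ih (i + 1) t (acc ++ [shlexQuote t]) r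
      (fun x hx => hall x (by simp [hx])) (by omega) (by simp at hle ⊢; omega)]
    simp only [List.getLastD_cons, List.map_cons, List.length_cons, List.append_assoc,
      List.cons_append, List.nil_append]
    rw [show i + (ts.length + 1) = i + 1 + ts.length by omega]

-- ===== VERDICT (by name: the statement is the Claim_ definition above) =====
theorem format_shell_command_lines_spec : Claim_equal_format_shell_command_lines := by
  intro command _
  show format_shell_command_lines command = format_shell_command_lines_alt command
  simp only [format_shell_command_lines, format_shell_command_lines_alt, aLead_eq, aRest_eq]
  rw [findIdx_eq_length_takeWhile command (fun t => PySem.Str.startswith t "-")]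
  cases hl : command.takeWhile (fun t => !PySem.Str.startswith t "-") with
  | nil =>
    conv_rhs => rw [← List.takeWhile_append_dropWhile
      (p := fun t => !PySem.Str.startswith t "-") (l := command)]
    rw [hl, List.length_nil, List.nil_append]
    rw [bGo_rest 0 _ 0 none [] (Nat.le_refl 0) (by intro s hs; cases hs)]
    simp [pRender, List.map_map, Function.comp]
  | cons t0 l =>
    have hall : ∀ x ∈ t0 :: l, PySem.Str.startswith x "-" = false := by
      intro x hx
      have := List.mem_takeWhile_imp (l := command)
        (p := fun t => !PySem.Str.startswith t "-") (by rw [hl]; exact hx)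
      simpa using this
    conv_rhs => rw [← List.takeWhile_append_dropWhile
      (p := fun t => !PySem.Str.startswith t "-") (l := command)]
    rw [hl, List.length_cons, List.cons_append, bGo]
    have hc0 : bMerge (l.length + 1) 0 none t0 = false := by
      show (decide ((0:Nat) > 0) && !PySem.Str.startswith t0 "-" &&
        (false || decide (0 < l.length + 1))) = false
      rw [decide_eq_false (by omega : ¬ ((0:Nat) > 0)), Bool.false_and, Bool.false_and]
    rw [hc0, if_neg Bool.false_ne_true, List.nil_append,
      show (0:Nat) + 1 = 1 from rfl]
    rw [bGo_lead (l.length + 1) l 1 t0 [shlexQuote t0]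
      (command.dropWhile (fun t => !PySem.Str.startswith t "-"))
      (fun x hx => hall x (by simp [hx])) (le_refl 1) (by omega)]
    have hlast : PySem.Str.startswith (l.getLastD t0) "-" = false :=
      hall _ List.getLastD_mem_cons
    rw [bGo_rest (l.length + 1) _ (1 + l.length) (some (l.getLastD t0)) _ (by omega)
      (fun s hs hst => by cases hs; rw [hlast] at hst; cases hst)]
    simp [pRender, List.map_map, Function.comp]
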